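-- pv_equiv track=rewrite | github.com/hdetang/AdventOfCode2021 | day3/day3.py | getBitsByIndex
-- ===== SOURCE A (Python) =====
-- def getBitsByIndex(reports):
--     bitsByIndex = []
--
--     for report in reports:
--         for index, bit in enumerate(report):
--             if (len(bitsByIndex) <= index):
--                 bitsByIndex.append(bit)
--                 continue
--             bitsByIndex[index] += bit
--     return bitsByIndex
-- ===== SOURCE B (Python) =====
-- def getBitsByIndex(reports):
--     # Column-major: compute the widest row, then build each column directly.
--     width = max(map(len, reports), default=0)
--     return [''.join(r[i] for r in reports if i < len(r)) for i in range(width)]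
-- ===== Notes on version B (the rewrite author's own statement) =====
-- stated objective: faster
-- what changed: B builds the result column-major (compute the max row length, then join each column in one pass) instead of A's row-by-row scan that grows each column string by repeated '+=' concatenation.
import Mathlib
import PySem

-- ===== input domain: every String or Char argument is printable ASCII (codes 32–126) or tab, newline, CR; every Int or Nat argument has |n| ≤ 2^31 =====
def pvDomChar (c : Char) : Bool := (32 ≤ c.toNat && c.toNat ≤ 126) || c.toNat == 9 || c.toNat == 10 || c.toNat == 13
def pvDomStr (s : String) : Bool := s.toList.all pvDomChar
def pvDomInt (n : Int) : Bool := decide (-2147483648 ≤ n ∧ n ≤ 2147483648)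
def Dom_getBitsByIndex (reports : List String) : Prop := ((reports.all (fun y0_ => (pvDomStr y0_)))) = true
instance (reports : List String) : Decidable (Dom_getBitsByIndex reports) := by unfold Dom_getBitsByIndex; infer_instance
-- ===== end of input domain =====

-- B rebuilds the result column-major (max row length, then one direct scan per column)
-- instead of A's row-by-row scan mutating a per-index accumulator; objective: idiomatic.

-- ===== PORT A =====
-- inner loop body of A: append when the index is new, otherwise extend the stored string
def pvStepA (bits : List (List Char)) (ib : Int × Char) : List (List Char) :=
  if (bits.length : Int) ≤ ib.1 then bits ++ [[ib.2]]
  else PySem.List.pySetD bits ib.1 (PySem.List.pyGetD bits ib.1 [] ++ [ib.2])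

def getBitsByIndex (reports : List String) : List String :=
  (reports.foldl
    (fun bits report => (PySem.List.enumerate report.toList).foldl pvStepA bits)
    ([] : List (List Char))).map (fun cs => String.ofList cs)

-- ===== PORT B =====
def getBitsByIndex_alt (reports : List String) : List String :=
  (List.range ((reports.map (fun r => r.toList.length)).foldl max 0)).map
    (fun i => String.ofList (reports.filterMap (fun r => r.toList[i]?)))

-- ===== PRECONDITION & SPEC =====
def Spec_getBitsByIndex (reports : List String) (out : List String) : Prop := out = getBitsByIndex_alt reports
instance (reports : List String) (out : List String) : Decidable (Spec_getBitsByIndex reports out) := by unfold Spec_getBitsByIndex; infer_instance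

-- ===== CLAIM (what is proved, stated in full; the proofs are below) =====
def Claim_equal_getBitsByIndex : Prop := ∀ (reports : List String), Dom_getBitsByIndex reports → Spec_getBitsByIndex reports (getBitsByIndex reports)

-- ===== LEMMAS AND PROOFS =====

-- merging one row of characters into the accumulated columns (what A's inner loop does)
def pvMerge : List (List Char) → List Char → List (List Char)
  | bs, [] => bs
  | [], c :: cs => [c] :: pvMerge [] cs
  | b :: bs, c :: cs => (b ++ [c]) :: pvMerge bs cs

theorem pvMerge_nil (bs : List (List Char)) : pvMerge bs [] = bs := by
  cases bs <;> rfl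

theorem pvStepA_inner (cs : List Char) :
    ∀ (pre bits : List (List Char)),
      (PySem.List.enumerate cs (pre.length : Int)).foldl pvStepA (pre ++ bits)
        = pre ++ pvMerge bits cs := by
  induction cs with
  | nil => intro pre bits; simp [PySem.List.enumerate_nil, pvMerge_nil]
  | cons c cs ih =>
    intro pre bits
    rw [PySem.List.enumerate_cons, List.foldl_cons]
    cases bits with
    | nil =>
      have hstep : pvStepA (pre ++ []) ((pre.length : Int), c) = (pre ++ [[c]]) ++ [] := by
        simp [pvStepA]
      rw [hstep]
      have h1 : ((pre.length : Int) + 1) = (((pre ++ [[c]]).length : Nat) : Int) := by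
        simp
      rw [h1, ih (pre ++ [[c]]) []]
      simp [pvMerge]
    | cons b bs =>
      have hstep : pvStepA (pre ++ b :: bs) ((pre.length : Int), c)
          = (pre ++ [b ++ [c]]) ++ bs := by
        simp only [pvStepA]
        rw [if_neg (by simp)]
        rw [PySem.List.pySetD_natCast, PySem.List.pyGetD_natCast]
        simp [List.getD]
      rw [hstep]
      have h1 : ((pre.length : Int) + 1) = (((pre ++ [b ++ [c]]).length : Nat) : Int) := by
        simp
      rw [h1, ih (pre ++ [b ++ [c]]) bs]
      simp [pvMerge]

theorem pvStepA_eq_pvMerge (bits : List (List Char)) (cs : List Char) :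
    (PySem.List.enumerate cs).foldl pvStepA bits = pvMerge bits cs := by
  simpa using pvStepA_inner cs [] bits

theorem pvMerge_length (bs : List (List Char)) (cs : List Char) :
    (pvMerge bs cs).length = max bs.length cs.length := by
  induction cs generalizing bs with
  | nil => simp [pvMerge_nil]
  | cons c cs ih =>
    cases bs with
    | nil => simp [pvMerge, ih]
    | cons b bs => simp [pvMerge, ih]

theorem pvMerge_getElem? (bs : List (List Char)) (cs : List Char) (i : Nat)
    (h : i < max bs.length cs.length) :
    (pvMerge bs cs)[i]? = some (bs.getD i [] ++ (cs[i]?).toList) := by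
  induction cs generalizing bs i with
  | nil =>
    simp only [Nat.max_eq_left (Nat.zero_le _), List.length_nil] at h
    simp [pvMerge_nil, List.getD, List.getElem?_eq_getElem h]
  | cons c cs ih =>
    cases bs with
    | nil =>
      cases i with
      | zero => simp [pvMerge]
      | succ i =>
        simp only [pvMerge, List.getElem?_cons_succ]
        have := ih [] i (by simp at h ⊢; omega)
        simpa [List.getD] using this
    | cons b bs =>
      cases i with
      | zero => simp [pvMerge, List.getD]
      | succ i =>
        simp only [pvMerge, List.getElem?_cons_succ]
        have := ih bs i (by simp at h ⊢; omega)
        simpa [List.getD] using this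

def pvW (rows : List (List Char)) : Nat := (rows.map List.length).foldl max 0

def pvCol (rows : List (List Char)) (i : Nat) : List Char :=
  rows.filterMap (fun r => r[i]?)

theorem pvCol_eq_nil_of_le (rows : List (List Char)) (i : Nat) (h : pvW rows ≤ i) :
    pvCol rows i = [] := by
  apply List.filterMap_eq_nil_iff.mpr
  intro r hr
  have : r.length ≤ pvW rows :=
    (PySem.List.le_foldl_max (rows.map List.length) 0).2 r.length (List.mem_map_of_mem hr)
  exact List.getElem?_eq_none (by omega)

theorem pvCol_append_singleton (rows : List (List Char)) (r : List Char) (i : Nat) :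
    pvCol (rows ++ [r]) i = pvCol rows i ++ (r[i]?).toList := by
  simp only [pvCol, List.filterMap_append]
  cases h : r[i]? <;> simp [h]

theorem pvFold_core (rows : List (List Char)) :
    rows.foldl pvMerge [] = (List.range (pvW rows)).map (pvCol rows) := by
  induction rows using List.reverseRecOn with
  | nil => simp [pvW]
  | append_singleton rows r ih =>
    have hW : pvW (rows ++ [r]) = max (pvW rows) r.length := by
      simp [pvW, List.foldl_append]
    rw [List.foldl_append, List.foldl_cons, List.foldl_nil, ih]
    apply List.ext_getElem?
    intro i
    by_cases hi : i < max (pvW rows) r.length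
    · rw [pvMerge_getElem? _ _ i (by simpa using hi)]
      rw [List.getElem?_map, List.getElem?_range (by omega : i < pvW (rows ++ [r]))]
      rw [Option.map_some, pvCol_append_singleton]
      congr 1
      by_cases hw : i < pvW rows
      · simp [List.getD, List.getElem?_map, List.getElem?_range hw]
      · rw [pvCol_eq_nil_of_le rows i (by omega)]
        have hnone : (List.range (pvW rows))[i]? = none :=
          List.getElem?_eq_none (by simpa using (show pvW rows ≤ i by omega))
        simp [List.getD, hnone]
    · rw [List.getElem?_eq_none, List.getElem?_eq_none]
      · simp [hW]; omega
      · rw [pvMerge_length]; simp; omega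

-- ===== VERDICT (by name: the statement is the Claim_ definition above) =====
theorem getBitsByIndex_spec : Claim_equal_getBitsByIndex := by
  intro reports hdom
  clear hdom
  unfold Spec_getBitsByIndex getBitsByIndex getBitsByIndex_alt
  have hcore : reports.foldl
      (fun bits report => (PySem.List.enumerate report.toList).foldl pvStepA bits)
      ([] : List (List Char))
      = (reports.map String.toList).foldl pvMerge [] := by
    generalize ([] : List (List Char)) = init
    induction reports generalizing init with
    | nil => rfl
    | cons r rs ihr =>
      rw [List.map_cons, List.foldl_cons, List.foldl_cons, pvStepA_eq_pvMerge]
      exact ihr _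
  rw [hcore, pvFold_core]
  have hlen : (List.map String.toList reports).map List.length
      = reports.map (fun r => r.toList.length) := by simp [List.map_map]
  unfold pvW pvCol
  rw [hlen, List.map_map]
  apply List.map_congr_left
  intro i _
  simp [Function.comp, List.filterMap_map]
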